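-- pv_equiv track=rewrite | github.com/emalokchaudhary/Exacto_EM | EM_testing/ExtractCustomFields/db_connection.py | get_fields_Names
-- ===== SOURCE A (Python) =====
-- def get_fields_Names(dbList):
--         standard_fields = ""
--         standard_custom_fields = ""
--         table_fields = ""
--         table_custom_fields = ""
--         for field_map in dbList:
--             if(field_map["field_type"]=='S'):
--                 standard_fields = standard_fields + "," +  field_map["field_key"]
--             if(field_map["field_type"]=='SC'):
--                 standard_custom_fields = standard_custom_fields + "," +  field_map["mapped_field"]
--             if(field_map["field_type"]=='T'):
--                 table_fields = table_fields + "," +  field_map["field_key"]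
--             if(field_map["field_type"]=='TC'):
--                 table_custom_fields = table_custom_fields + "," +  field_map["mapped_field"]
--
--         refine_list= { 'standard_list':standard_fields[1:],'standard_custom_list':standard_custom_fields[1:],'table_list':table_fields[1:],'table_custom_list':table_custom_fields[1:] }
--
--         return refine_list
-- ===== SOURCE B (Python) =====
-- def get_fields_Names(dbList):
--     return {
--         'standard_list': ','.join(f['field_key'] for f in dbList if f['field_type'] == 'S'),
--         'standard_custom_list': ','.join(f['mapped_field'] for f in dbList if f['field_type'] == 'SC'),
--         'table_list': ','.join(f['field_key'] for f in dbList if f['field_type'] == 'T'),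
--         'table_custom_list': ','.join(f['mapped_field'] for f in dbList if f['field_type'] == 'TC'),
--     }
-- ===== Notes on version B (the rewrite author's own statement) =====
-- stated objective: idiomatic
-- what changed: Replaces the single stateful loop over four comma-prefixed string accumulators (each finally sliced with [1:]) by four independent ','.join expressions over filtered generator passes, so no accumulator state or leading-comma trick is needed.
import Mathlib
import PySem

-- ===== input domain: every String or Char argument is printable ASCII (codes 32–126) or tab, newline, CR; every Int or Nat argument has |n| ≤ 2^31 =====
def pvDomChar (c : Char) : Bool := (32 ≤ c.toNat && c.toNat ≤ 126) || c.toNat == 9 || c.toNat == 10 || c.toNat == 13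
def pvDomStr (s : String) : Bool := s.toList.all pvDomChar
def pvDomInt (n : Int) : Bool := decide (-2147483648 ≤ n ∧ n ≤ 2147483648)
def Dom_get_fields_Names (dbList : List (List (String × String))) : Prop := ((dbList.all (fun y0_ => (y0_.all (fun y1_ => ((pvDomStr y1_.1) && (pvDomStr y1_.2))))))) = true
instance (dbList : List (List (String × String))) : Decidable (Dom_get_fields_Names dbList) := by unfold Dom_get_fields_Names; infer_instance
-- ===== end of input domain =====

-- B changes the structure: four independent ','.join passes over filtered views instead of one
-- stateful loop with comma-prefixed accumulators and [1:] slices; same cost, no speed claim.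
-- dict lookup d[k] on the association list: first matching key; "" only reached outside Pre_
def pvGet (d : List (String × String)) (k : String) : List Char :=
  (((d.find? (fun p => p.1 == k)).map (·.2)).getD "").toList

-- ===== PORT A =====
-- one pass; the four accumulators are carried as a quadruple of char lists (strings)
def goA (acc : List Char × List Char × List Char × List Char) (fm : List (String × String)) :
    List Char × List Char × List Char × List Char :=
  let (s, sc, t, tc) := acc
  let ft := pvGet fm "field_type"
  let s := if ft = ['S'] then s ++ [','] ++ pvGet fm "field_key" else s
  let sc := if ft = ['S', 'C'] then sc ++ [','] ++ pvGet fm "mapped_field" else sc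
  let t := if ft = ['T'] then t ++ [','] ++ pvGet fm "field_key" else t
  let tc := if ft = ['T', 'C'] then tc ++ [','] ++ pvGet fm "mapped_field" else tc
  (s, sc, t, tc)

def get_fields_Names (dbList : List (List (String × String))) : List (String × String) :=
  let r := dbList.foldl goA ([], [], [], [])
  [("standard_list", String.ofList (r.1.drop 1)),          -- s[1:]
   ("standard_custom_list", String.ofList (r.2.1.drop 1)),
   ("table_list", String.ofList (r.2.2.1.drop 1)),
   ("table_custom_list", String.ofList (r.2.2.2.drop 1))]

-- ===== PORT B =====
-- ','.join(f[key] for f in dbList if f['field_type'] == ty)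
def pickB (dbList : List (List (String × String))) (ty : List Char) (key : String) : List Char :=
  PySem.Chars.join [','] ((dbList.filter (fun fm => pvGet fm "field_type" = ty)).map (fun fm => pvGet fm key))

def get_fields_Names_alt (dbList : List (List (String × String))) : List (String × String) :=
  [("standard_list", String.ofList (pickB dbList ['S'] "field_key")),
   ("standard_custom_list", String.ofList (pickB dbList ['S', 'C'] "mapped_field")),
   ("table_list", String.ofList (pickB dbList ['T'] "field_key")),
   ("table_custom_list", String.ofList (pickB dbList ['T', 'C'] "mapped_field"))]

-- ===== PRECONDITION & SPEC =====
-- Pre_ excludes exactly the inputs on which the Python A raises KeyError: a field_map without a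
-- "field_type" key, or whose type names a field ("field_key" / "mapped_field") the map lacks.
def Pre_get_fields_Names (dbList : List (List (String × String))) : Prop :=
  ∀ fm ∈ dbList,
    ((fm.find? (fun p => p.1 == "field_type")).isSome
     ∧ (pvGet fm "field_type" = ['S'] ∨ pvGet fm "field_type" = ['T'] →
          (fm.find? (fun p => p.1 == "field_key")).isSome)
     ∧ (pvGet fm "field_type" = ['S', 'C'] ∨ pvGet fm "field_type" = ['T', 'C'] →
          (fm.find? (fun p => p.1 == "mapped_field")).isSome))
instance (dbList : List (List (String × String))) : Decidable (Pre_get_fields_Names dbList) := by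
  unfold Pre_get_fields_Names; infer_instance

def pvWitness_get_fields_Names : (List (List (String × String))) :=
  [[("field_type", "S"), ("field_key", "name")],
   [("field_type", "TC"), ("mapped_field", "cust1")],
   [("field_type", "X")]]

def Spec_get_fields_Names (dbList : List (List (String × String))) (out : List (String × String)) : Prop := out = get_fields_Names_alt dbList
instance (dbList : List (List (String × String))) (out : List (String × String)) : Decidable (Spec_get_fields_Names dbList out) := by unfold Spec_get_fields_Names; infer_instance

-- ===== CLAIM (what is proved, stated in full; the proofs are below) =====
def Claim_equal_get_fields_Names : Prop := ∀ (dbList : List (List (String × String))), Dom_get_fields_Names dbList → Pre_get_fields_Names dbList → Spec_get_fields_Names dbList (get_fields_Names dbList)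

-- ===== LEMMAS AND PROOFS =====

-- the comma-prefixed chunks A concatenates, per category
def chunks (dbList : List (List (String × String))) (ty : List Char) (key : String) : List Char :=
  (dbList.filter (fun fm => pvGet fm "field_type" = ty)).flatMap (fun fm => ',' :: pvGet fm key)

lemma chunks_cons (fm : List (String × String)) (rest : List (List (String × String)))
    (ty : List Char) (key : String) :
    chunks (fm :: rest) ty key =
      (if pvGet fm "field_type" = ty then ',' :: pvGet fm key else []) ++ chunks rest ty key := by
  simp only [chunks, List.filter_cons]
  split_ifs with h <;> simp_all

-- loop invariant: A's fold appends each category's chunks to its accumulator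
lemma foldl_goA (dbList : List (List (String × String))) :
    ∀ s sc t tc, dbList.foldl goA (s, sc, t, tc) =
      (s ++ chunks dbList ['S'] "field_key",
       sc ++ chunks dbList ['S', 'C'] "mapped_field",
       t ++ chunks dbList ['T'] "field_key",
       tc ++ chunks dbList ['T', 'C'] "mapped_field") := by
  induction dbList with
  | nil => simp [chunks]
  | cons fm rest ih =>
    intro s sc t tc
    simp only [List.foldl_cons, goA]
    rw [ih]
    simp only [chunks_cons]
    split_ifs <;> simp

-- dropping the leading comma of the flattened chunks is exactly ','.join
lemma drop_one_flatMap (l : List (List Char)) :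
    (l.flatMap (fun k => ',' :: k)).drop 1 = PySem.Chars.join [','] l := by
  induction l with
  | nil => simp [PySem.Chars.join_nil]
  | cons x xs ih =>
    cases xs with
    | nil => simp [PySem.Chars.join_singleton]
    | cons y ys =>
      have h : (y :: ys).flatMap (fun k => ',' :: k) =
          ',' :: PySem.Chars.join [','] (y :: ys) := by
        simpa using (congrArg (List.cons ',') ih.symm).symm
      simp only [List.flatMap_cons] at h ⊢
      simp [h, PySem.Chars.join_cons_cons]

lemma chunks_drop (dbList : List (List (String × String))) (ty : List Char) (key : String) :
    (chunks dbList ty key).drop 1 = pickB dbList ty key := by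
  simpa [chunks, pickB, List.flatMap_def] using
    drop_one_flatMap ((dbList.filter (fun fm => pvGet fm "field_type" = ty)).map (fun fm => pvGet fm key))

-- ===== VERDICT (by name: the statement is the Claim_ definition above) =====
theorem get_fields_Names_spec : Claim_equal_get_fields_Names := by
  intro dbList _ _
  unfold Spec_get_fields_Names get_fields_Names get_fields_Names_alt
  simp only [foldl_goA, List.nil_append, chunks_drop]
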